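-- pv_equiv track=rewrite | github.com/LALA09-erha/Python-TrainingProject | struktur data/_tugas1.py | balikkata
-- ===== SOURCE A (Python) =====
-- def stack():
--     s=[]
--     return (s)
--
-- def push(s,data):
--     s.append(data)
--
-- def pop(s):
--     data=s.pop()
--     return(data)
--
-- def size(s):
--     return(len(s))
--
-- def balikkata(kata):
--     tumpukan= stack()
--     temp = ""
--     for i in kata:
--         push(tumpukan,i)
--     panjang = size(tumpukan)
--     while panjang >0:
--         seleksi = pop(tumpukan)
--         temp += seleksi
--         panjang -=1
--     return(temp)
-- ===== SOURCE B (Python) =====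
-- def balikkata(kata):
--     temp = ""
--     for i in kata:
--         temp = i + temp
--     return temp
-- ===== Notes on version B (the rewrite author's own statement) =====
-- stated objective: simpler
-- what changed: Drops the stack and the push/pop/size helpers: a single forward pass prepends each character to the accumulator, no data structure and no second loop.
import Mathlib
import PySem

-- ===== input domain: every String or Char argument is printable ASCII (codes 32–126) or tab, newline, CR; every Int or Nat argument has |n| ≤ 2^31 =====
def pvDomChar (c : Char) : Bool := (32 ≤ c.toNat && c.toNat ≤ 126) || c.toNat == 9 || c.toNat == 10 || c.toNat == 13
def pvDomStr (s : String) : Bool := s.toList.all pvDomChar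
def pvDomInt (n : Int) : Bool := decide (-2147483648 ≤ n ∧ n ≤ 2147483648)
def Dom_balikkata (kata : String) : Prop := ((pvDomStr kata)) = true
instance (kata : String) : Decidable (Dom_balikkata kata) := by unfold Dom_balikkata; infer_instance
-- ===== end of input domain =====

-- B drops A's stack and push/pop/size helpers: one forward pass prepending each character (simpler).


-- ===== PORT A =====
-- while panjang > 0: seleksi = pop(tumpukan); temp += seleksi; panjang -= 1
-- (s.pop() pops the LAST element; panjang counts down from the stack's length)
def balikkataPopLoop : Nat → List Char → List Char → List Char
  | 0, _, temp => temp
  | n + 1, s, temp =>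
    match s.getLast? with
    | some seleksi => balikkataPopLoop n s.dropLast (temp ++ [seleksi])
    | none => temp  -- unreachable: panjang = length of the stack

def balikkata (kata : String) : String :=
  let tumpukan := kata.toList.foldl (fun s i => s ++ [i]) []  -- for i in kata: push(tumpukan, i)
  let panjang := tumpukan.length                               -- panjang = size(tumpukan)
  String.mk (balikkataPopLoop panjang tumpukan [])

-- ===== PORT B =====
def balikkata_alt (kata : String) : String :=
  String.mk (kata.toList.foldl (fun temp i => i :: temp) [])  -- temp = i + temp

-- ===== PRECONDITION & SPEC =====
def Spec_balikkata (kata : String) (out : String) : Prop := out = balikkata_alt kata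
instance (kata : String) (out : String) : Decidable (Spec_balikkata kata out) := by unfold Spec_balikkata; infer_instance

-- ===== CLAIM (what is proved, stated in full; the proofs are below) =====
def Claim_equal_balikkata : Prop := ∀ (kata : String), Dom_balikkata kata → Spec_balikkata kata (balikkata kata)

-- ===== LEMMAS AND PROOFS =====
theorem balikkataPopLoop_eq (s : List Char) : ∀ temp, balikkataPopLoop s.length s temp = temp ++ s.reverse := by
  induction s using List.reverseRecOn with
  | nil => intro temp; simp [balikkataPopLoop]
  | append_singleton s' c ih =>
      intro temp
      simp only [List.length_append, List.length_singleton]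
      simp [balikkataPopLoop, ih]

theorem balikkata_foldl_cons (l : List Char) : ∀ acc, l.foldl (fun temp i => i :: temp) acc = l.reverse ++ acc := by
  induction l with
  | nil => intro acc; simp
  | cons c t ih => intro acc; simp [List.foldl, ih]

-- ===== VERDICT (by name: the statement is the Claim_ definition above) =====
theorem balikkata_spec : Claim_equal_balikkata := by
  intro kata _
  unfold Spec_balikkata balikkata balikkata_alt
  rw [PySem.List.foldl_append_singleton, balikkata_foldl_cons]
  simp only [List.nil_append, List.append_nil]
  rw [balikkataPopLoop_eq]
  simp
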